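-- pv_equiv track=rewrite | github.com/sadyan9123/RL_DomainSel | code/RL_2_domain/utils/pdProcess.py | generateProgramData
-- ===== SOURCE A (Python) =====
-- def generateProgramData(trans_seq):
--     total = []
--     cur = []
--     for i, row in enumerate(trans_seq):
--         cur.append(row[0])
--         if row[-1] == 1: #terminal is true
--             total.append(cur.copy())
--             cur.clear()
--     return total
-- ===== SOURCE B (Python) =====
-- def generateProgramData(trans_seq):
--     firsts = [row[0] for row in trans_seq]
--     bounds = [i for i, row in enumerate(trans_seq) if row[-1] == 1]
--     total = []
--     start = 0
--     for b in bounds: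
--         total.append(firsts[start:b + 1])
--         start = b + 1
--     return total
-- ===== Notes on version B (the rewrite author's own statement) =====
-- stated objective: alternative
-- what changed: Instead of carrying a mutable current-group accumulator through one loop, B precomputes the list of first elements and the terminal boundary indices, then emits each group as a slice between consecutive boundaries.
-- outside the precondition, e.g. on generateProgramData([[]]): A raises IndexError, B raises IndexError
import Mathlib
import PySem

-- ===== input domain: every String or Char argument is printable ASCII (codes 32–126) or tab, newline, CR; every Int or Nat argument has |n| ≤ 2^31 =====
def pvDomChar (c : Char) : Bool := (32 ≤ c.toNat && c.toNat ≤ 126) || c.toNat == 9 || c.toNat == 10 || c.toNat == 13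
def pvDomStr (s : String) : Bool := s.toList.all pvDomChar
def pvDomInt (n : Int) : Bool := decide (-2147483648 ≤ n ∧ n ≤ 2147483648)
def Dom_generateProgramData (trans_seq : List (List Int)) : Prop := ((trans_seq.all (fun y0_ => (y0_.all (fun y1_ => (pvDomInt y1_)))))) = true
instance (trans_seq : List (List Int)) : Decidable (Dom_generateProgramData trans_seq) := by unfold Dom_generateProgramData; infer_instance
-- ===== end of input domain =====

-- B: instead of one loop carrying a mutable current-group accumulator, precompute the
-- first elements and the terminal boundary indices, then slice between consecutive
-- boundaries (objective: alternative decomposition, same cost). Return values only.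

-- ===== PORT A =====
def generateProgramData (trans_seq : List (List Int)) : List (List Int) :=
  ((PySem.List.enumerate trans_seq 0).foldl
    (fun (st : List (List Int) × List Int) p =>
      let cur := st.2 ++ [(PySem.List.pyGet? p.2 0).getD 0]
      if (PySem.List.pyGet? p.2 (-1)).getD 0 == 1 then (st.1 ++ [cur], [])
      else (st.1, cur))
    ([], [])).1

-- ===== PORT B =====
def generateProgramData_alt (trans_seq : List (List Int)) : List (List Int) :=
  let firsts := trans_seq.map (fun row => (PySem.List.pyGet? row 0).getD 0)
  let bounds := ((PySem.List.enumerate trans_seq 0).filter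
      (fun p => (PySem.List.pyGet? p.2 (-1)).getD 0 == 1)).map (·.1)
  (bounds.foldl
    (fun (st : Int × List (List Int)) b =>
      (b + 1, st.2 ++ [PySem.List.slice firsts (some st.1) (some (b + 1))]))
    (0, [])).2

-- ===== PRECONDITION & SPEC =====
-- Pre_ excludes inputs containing an empty row, on which Python A raises IndexError (row[0]).
def Pre_generateProgramData (trans_seq : List (List Int)) : Prop :=
  (trans_seq.all (fun row => !row.isEmpty)) = true
instance (trans_seq : List (List Int)) : Decidable (Pre_generateProgramData trans_seq) := by
  unfold Pre_generateProgramData; infer_instance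
def pvWitness_generateProgramData : List (List Int) := [[3, 0], [5, 1], [7, 1], [9, 0]]

def Spec_generateProgramData (trans_seq : List (List Int)) (out : List (List Int)) : Prop := out = generateProgramData_alt trans_seq
instance (trans_seq : List (List Int)) (out : List (List Int)) : Decidable (Spec_generateProgramData trans_seq out) := by unfold Spec_generateProgramData; infer_instance

-- ===== CLAIM (what is proved, stated in full; the proofs are below) =====
def Claim_equal_generateProgramData : Prop := ∀ (trans_seq : List (List Int)), Dom_generateProgramData trans_seq → Pre_generateProgramData trans_seq → Spec_generateProgramData trans_seq (generateProgramData trans_seq)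

-- ===== LEMMAS AND PROOFS =====

def pvF0 (r : List Int) : Int := (PySem.List.pyGet? r 0).getD 0
def pvTerm (r : List Int) : Bool := (PySem.List.pyGet? r (-1)).getD 0 == 1

-- reference grouping both ports are reduced to
def pvG (cur : List Int) : List (List Int) → List (List Int)
  | [] => []
  | r :: rs => if pvTerm r then (cur ++ [pvF0 r]) :: pvG [] rs else pvG (cur ++ [pvF0 r]) rs

theorem pvA_fold (l : List (List Int)) : ∀ (s : Int) (total : List (List Int)) (cur : List Int),
    ((PySem.List.enumerate l s).foldl
      (fun (st : List (List Int) × List Int) p =>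
        let cur := st.2 ++ [(PySem.List.pyGet? p.2 0).getD 0]
        if (PySem.List.pyGet? p.2 (-1)).getD 0 == 1 then (st.1 ++ [cur], [])
        else (st.1, cur))
      (total, cur)).1 = total ++ pvG cur l := by
  induction l with
  | nil => intro s total cur; simp [PySem.List.enumerate_nil, pvG]
  | cons r rs ih =>
    intro s total cur
    rw [PySem.List.enumerate_cons]
    simp only [List.foldl_cons]
    by_cases h : pvTerm r
    · have h' : ((PySem.List.pyGet? r (-1)).getD 0 == 1) = true := h
      simp only [h', if_pos, pvG, h, ih]
      simp [pvF0]
    · have h' : ((PySem.List.pyGet? r (-1)).getD 0 == 1) = false := by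
        simpa [pvTerm] using h
      simp only [h', pvG, h, ih]
      simp [pvF0]

theorem pvDrop_take_succ (F : List Int) (t : List Int) (x : Int) (s k : Nat)
    (hsk : s ≤ k) (hF : F.drop k = x :: t) :
    (F.drop s).take (k + 1 - s) = (F.drop s).take (k - s) ++ [x] := by
  have hget : (F.drop s)[k - s]? = some x := by
    rw [List.getElem?_drop]
    have : s + (k - s) = k := by omega
    rw [this, ← List.head?_drop, hF]; rfl
  have : k + 1 - s = (k - s) + 1 := by omega
  rw [this, List.take_add_one, hget]
  rfl

theorem pvB_fold (l : List (List Int)) : ∀ (k s : Nat) (acc : List (List Int)) (F : List Int),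
    s ≤ k → F.drop k = l.map pvF0 →
    (((((PySem.List.enumerate l (k : Int)).filter (fun p => (PySem.List.pyGet? p.2 (-1)).getD 0 == 1)).map (·.1)).foldl
      (fun (st : Int × List (List Int)) b =>
        (b + 1, st.2 ++ [PySem.List.slice F (some st.1) (some (b + 1))]))
      ((s : Int), acc)).2) = acc ++ pvG ((F.drop s).take (k - s)) l := by
  induction l with
  | nil => intro k s acc F _ _; simp [PySem.List.enumerate_nil, pvG]
  | cons r rs ih =>
    intro k s acc F hsk hF
    have hF' : F.drop (k + 1) = rs.map pvF0 := by
      rw [← List.tail_drop, hF]; simp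
    rw [PySem.List.enumerate_cons]
    by_cases h : pvTerm r
    · have h' : ((PySem.List.pyGet? r (-1)).getD 0 == 1) = true := h
      simp only [List.filter_cons, h', if_pos, List.map_cons, List.foldl_cons]
      have hcast : (k : Int) + 1 = ((k + 1 : Nat) : Int) := by push_cast; ring
      rw [hcast, ih (k + 1) (k + 1) _ F (le_refl _) hF']
      have hslice : PySem.List.slice F (some (s : Int)) (some ((k + 1 : Nat) : Int))
          = (F.drop s).take (k + 1 - s) := by
        rw [PySem.List.slice_natCast]
      rw [hslice, pvDrop_take_succ F (rs.map pvF0) (pvF0 r) s k hsk (by simpa using hF)]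
      simp [pvG, h]
    · have h' : ((PySem.List.pyGet? r (-1)).getD 0 == 1) = false := by
        simpa [pvTerm] using h
      simp only [List.filter_cons, h', if_neg, Bool.false_eq_true, not_false_iff]
      have hcast : (k : Int) + 1 = ((k + 1 : Nat) : Int) := by push_cast; ring
      rw [hcast, ih (k + 1) s acc F (by omega) hF']
      rw [pvDrop_take_succ F (rs.map pvF0) (pvF0 r) s k hsk (by simpa using hF)]
      simp [pvG, h]

-- ===== VERDICT (by name: the statement is the Claim_ definition above) =====
theorem generateProgramData_spec : Claim_equal_generateProgramData := by
  intro ts _ _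
  unfold Spec_generateProgramData generateProgramData generateProgramData_alt
  have hA := pvA_fold ts 0 [] []
  have hB := pvB_fold ts 0 0 [] (ts.map pvF0) (le_refl 0) (by simp)
  simp only [List.drop_zero, Nat.sub_zero, List.take_zero, Nat.cast_zero] at hB
  rw [hA]
  exact hB.symm
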